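-- pv_equiv track=rewrite | github.com/manwar/perlweeklychallenge-club | challenge-350/ulrich-rieke/python/ch-2.py | arePaired
-- ===== SOURCE A (Python) =====
-- def arePaired(firstNum , secondNum):
--     firstStr = str( firstNum )
--     secondStr = str( secondNum )
--     if len( firstStr ) == len( secondStr ):
--         firstset = {c for c in firstStr}
--         secondset = {c for c in secondStr}
--         return firstset == secondset and len( secondset ) == len( firstStr )
--     else:
--         return False
-- ===== SOURCE B (Python) =====
-- def arePaired(firstNum, secondNum):
--     a = sorted(str(firstNum))
--     b = sorted(str(secondNum))
--     if a != b:
--         return False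
--     return all(a[i] != a[i + 1] for i in range(len(a) - 1))
-- ===== Notes on version B (the rewrite author's own statement) =====
-- stated objective: alternative
-- what changed: Replaces A's two set constructions plus set-equality and cardinality check with sorting both digit strings, comparing the sorted lists, and scanning the sorted list for an adjacent duplicate.
import Mathlib
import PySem

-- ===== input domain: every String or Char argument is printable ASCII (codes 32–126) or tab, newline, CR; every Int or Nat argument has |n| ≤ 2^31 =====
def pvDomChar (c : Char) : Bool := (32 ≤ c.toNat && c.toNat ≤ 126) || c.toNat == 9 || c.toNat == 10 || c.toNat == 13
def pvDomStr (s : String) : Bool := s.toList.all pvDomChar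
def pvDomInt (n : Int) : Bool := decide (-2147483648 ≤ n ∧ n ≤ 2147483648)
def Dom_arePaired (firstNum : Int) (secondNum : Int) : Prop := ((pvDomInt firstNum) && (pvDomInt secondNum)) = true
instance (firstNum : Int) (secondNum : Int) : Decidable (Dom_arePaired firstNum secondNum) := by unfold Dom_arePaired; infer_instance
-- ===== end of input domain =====

-- B replaces A's two set constructions and cardinality check by sorting both digit strings,
-- comparing the sorted lists, and scanning for an adjacent duplicate (alternative decomposition, same behaviour).

-- ===== PORT A =====
def arePaired (firstNum : Int) (secondNum : Int) : Bool :=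
  let firstStr := PySem.Int.toChars firstNum
  let secondStr := PySem.Int.toChars secondNum
  if firstStr.length = secondStr.length then
    let firstset := PySem.Set.ofList firstStr
    let secondset := PySem.Set.ofList secondStr
    PySem.Set.equal firstset secondset && (PySem.Set.len secondset == (firstStr.length : Int))
  else
    false

-- ===== PORT B =====
def arePaired_alt (firstNum : Int) (secondNum : Int) : Bool :=
  let a := PySem.List.sorted (PySem.Int.toChars firstNum) (fun x => x)
  let b := PySem.List.sorted (PySem.Int.toChars secondNum) (fun x => x)
  if a ≠ b then false
  else
    (PySem.List.pyRange 0 ((a.length : Int) - 1) 1).all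
      (fun i => !(PySem.List.pyGetD a i ' ' == PySem.List.pyGetD a (i + 1) ' '))

-- ===== PRECONDITION & SPEC =====
def Spec_arePaired (firstNum : Int) (secondNum : Int) (out : Bool) : Prop := out = arePaired_alt firstNum secondNum
instance (firstNum : Int) (secondNum : Int) (out : Bool) : Decidable (Spec_arePaired firstNum secondNum out) := by unfold Spec_arePaired; infer_instance

-- ===== CLAIM (what is proved, stated in full; the proofs are below) =====
def Claim_equal_arePaired : Prop := ∀ (firstNum : Int) (secondNum : Int), Dom_arePaired firstNum secondNum → Spec_arePaired firstNum secondNum (arePaired firstNum secondNum)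

-- ===== LEMMAS AND PROOFS =====

-- set(xs) keeps a sub-sequence of xs (first occurrences, in order)
theorem pv_ofList_sublist {α : Type} [BEq α] (xs : List α) : (PySem.Set.ofList xs).Sublist xs := by
  induction xs using List.reverseRecOn with
  | nil => simp [PySem.Set.ofList_nil]
  | append_singleton xs x ih =>
      rw [PySem.Set.ofList_append_singleton, PySem.Set.add]
      by_cases h : (PySem.Set.ofList xs).contains x
      · simp only [h, if_pos]
        exact ih.trans (List.sublist_append_left xs [x])
      · simp only [h, if_neg, Bool.false_eq_true, not_false_iff]
        exact ih.append (List.Sublist.refl [x])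

-- len(set(xs)) == len(xs) exactly when xs has no duplicate
theorem pv_len_ofList_eq_iff_nodup {α : Type} [BEq α] [LawfulBEq α] (xs : List α) :
    (PySem.Set.ofList xs).length = xs.length ↔ xs.Nodup := by
  constructor
  · intro h
    have he : PySem.Set.ofList xs = xs := (pv_ofList_sublist xs).eq_of_length h
    rw [← he]; exact PySem.Set.nodup_ofList xs
  · intro h; rw [PySem.Set.ofList_eq_self_of_nodup xs h]

-- the adjacent-duplicate scan of B on a list a is exactly "no two neighbours equal"
theorem pv_scan_iff_isChain (a : List Char) :
    ((PySem.List.pyRange 0 ((a.length : Int) - 1) 1).all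
      (fun i => !(PySem.List.pyGetD a i ' ' == PySem.List.pyGetD a (i + 1) ' ')) = true)
    ↔ a.IsChain (· ≠ ·) := by
  rw [List.all_eq_true, List.isChain_iff_getElem]
  constructor
  · intro h i hi
    have hm : (i : Int) ∈ PySem.List.pyRange 0 ((a.length : Int) - 1) 1 := by
      rw [PySem.List.mem_pyRange_one]; omega
    have := h _ hm
    rw [PySem.List.pyGetD_eq_getElem a ' ' (by omega) (by exact_mod_cast (by omega : i < a.length))] at this
    have h1 : ((i : Int) + 1) = ((i + 1 : Nat) : Int) := by push_cast; ring
    rw [h1, PySem.List.pyGetD_eq_getElem a ' ' (by omega) (by exact_mod_cast hi)] at this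
    simpa [Int.toNat_natCast] using this
  · intro h x hx
    rw [PySem.List.mem_pyRange_one] at hx
    have hx0 : 0 ≤ x := hx.1
    have hx1 : x.toNat + 1 < a.length := by omega
    have hxx : x = ((x.toNat : Nat) : Int) := by omega
    rw [hxx, PySem.List.pyGetD_eq_getElem a ' ' (by omega) (by exact_mod_cast (by omega : x.toNat < a.length))]
    have h1 : ((x.toNat : Nat) : Int) + 1 = ((x.toNat + 1 : Nat) : Int) := by push_cast; ring
    rw [h1, PySem.List.pyGetD_eq_getElem a ' ' (by omega) (by exact_mod_cast hx1)]
    simp only [Int.toNat_natCast, Bool.not_eq_eq_eq_not, Bool.not_true, beq_eq_false_iff_ne]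
    exact h x.toNat hx1

-- on a weakly sorted list, "no two neighbours equal" is exactly Nodup
theorem pv_isChain_ne_iff_nodup (l : List Char) (hs : l.Pairwise (· ≤ ·)) :
    l.IsChain (· ≠ ·) ↔ l.Nodup := by
  constructor
  · intro h2
    have hc : l.IsChain (· < ·) := by
      rw [List.isChain_iff_getElem] at *
      intro i hi
      exact lt_of_le_of_ne ((List.isChain_iff_getElem.mp hs.isChain) i hi) (h2 i hi)
    exact (List.isChain_iff_pairwise.mp hc).imp ne_of_lt
  · intro h; exact h.isChain

-- the heart of the file: A's set test equals B's sort-and-scan, for any two char lists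
theorem pv_main (fs ss : List Char) :
    (if fs.length = ss.length then
       PySem.Set.equal (PySem.Set.ofList fs) (PySem.Set.ofList ss)
         && (PySem.Set.len (PySem.Set.ofList ss) == (fs.length : Int))
     else false)
    = (if (PySem.List.sorted fs (fun x => x)) ≠ (PySem.List.sorted ss (fun x => x)) then false
       else ((PySem.List.pyRange 0 (((PySem.List.sorted fs (fun x => x)).length : Int) - 1) 1).all
         (fun i => !(PySem.List.pyGetD (PySem.List.sorted fs (fun x => x)) i ' '
                      == PySem.List.pyGetD (PySem.List.sorted fs (fun x => x)) (i + 1) ' ')))) := by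
  by_cases hp : fs.Perm ss
  · have hsort : PySem.List.sorted fs (fun x => x) = PySem.List.sorted ss (fun x => x) :=
      (PySem.List.sorted_id_eq_sorted_id_iff_perm fs ss).mpr hp
    have hlen : fs.length = ss.length := hp.length_eq
    have hequal : PySem.Set.equal (PySem.Set.ofList fs) (PySem.Set.ofList ss) = true := by
      rw [PySem.Set.equal_iff]
      intro x
      rw [PySem.Set.mem_ofList, PySem.Set.mem_ofList]
      exact hp.mem_iff
    simp only [hlen, if_pos, hsort, ne_eq, not_true_eq_false, if_neg, hequal, Bool.true_and,
      not_false_eq_true]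
    rw [Bool.eq_iff_iff, beq_iff_eq, pv_scan_iff_isChain,
      pv_isChain_ne_iff_nodup _ (PySem.List.sorted_pairwise ss (fun x => x)),
      (PySem.List.sorted_perm ss (fun x => x) false).nodup_iff,
      PySem.Set.len, ← hlen]
    constructor
    · intro h
      have : (PySem.Set.ofList ss).length = fs.length := by exact_mod_cast h
      exact (pv_len_ofList_eq_iff_nodup ss).mp (by omega)
    · intro h
      have hn : ss.Nodup := h
      have := (pv_len_ofList_eq_iff_nodup ss).mpr hn
      omega
  · have hsort : PySem.List.sorted fs (fun x => x) ≠ PySem.List.sorted ss (fun x => x) := by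
      intro h; exact hp ((PySem.List.sorted_id_eq_sorted_id_iff_perm fs ss).mp h)
    simp only [ne_eq, hsort, not_false_eq_true, if_pos]
    by_cases hlen : fs.length = ss.length
    · simp only [hlen, if_pos]
      by_contra hand
      rw [Bool.not_eq_false, Bool.and_eq_true] at hand
      have hand' := hand
      have heq := (PySem.Set.equal_iff _ _).mp hand'.1
      have hlenb := beq_iff_eq.mp hand'.2
      have hsslen : (PySem.Set.ofList ss).length = ss.length := by
        rw [PySem.Set.len] at hlenb; omega
      have hssnd : ss.Nodup := (pv_len_ofList_eq_iff_nodup ss).mp hsslen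
      have hssself : PySem.Set.ofList ss = ss := (pv_ofList_sublist ss).eq_of_length hsslen
      have hmem : ∀ x, x ∈ PySem.Set.ofList fs ↔ x ∈ ss := by
        intro x
        rw [heq x, hssself]
      have hperm1 : (PySem.Set.ofList fs).Perm ss :=
        (List.perm_ext_iff_of_nodup (PySem.Set.nodup_ofList fs) hssnd).mpr hmem
      have hflen : (PySem.Set.ofList fs).length = fs.length := by
        rw [hperm1.length_eq]; omega
      have hfself : PySem.Set.ofList fs = fs := (pv_ofList_sublist fs).eq_of_length hflen
      exact hp (hfself ▸ hperm1)
    · simp [hlen]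

-- ===== VERDICT (by name: the statement is the Claim_ definition above) =====
theorem arePaired_spec : Claim_equal_arePaired := by
  intro firstNum secondNum _
  unfold Spec_arePaired arePaired arePaired_alt
  exact pv_main (PySem.Int.toChars firstNum) (PySem.Int.toChars secondNum)
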